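-- pv_equiv track=rewrite | github.com/andreidm92/algo_and_structures_python | Lesson_2/5.py | codes
-- ===== SOURCE A (Python) =====
-- def codes(n, m, i):
--     if m-1 > n:
--         i +=1
--         if (i) % 10 == 0:
--             return str("{:4d}-{}".format (n, chr(n))) + '\n' + str(codes(n+1,m, i))
--         else:
--             return str("{:4d}-{}".format(n, chr(n))) + str(codes(n + 1, m, i))
--     else:
--         return str("{:4d}-{}".format(m-1, chr(m-1)))
-- ===== SOURCE B (Python) =====
-- def codes(n, m, i):
--     pieces = []
--     for k in range(n, m - 1):
--         i += 1
--         pieces.append("{:4d}-{}".format(k, chr(k)))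
--         if i % 10 == 0:
--             pieces.append("\n")
--     pieces.append("{:4d}-{}".format(m - 1, chr(m - 1)))
--     return "".join(pieces)
-- ===== Notes on version B (the rewrite author's own statement) =====
-- stated objective: alternative
-- what changed: Replaces A's self-recursion (string concatenated on the way back up each return) with a single flat for-loop over range(n, m-1) that appends pieces to a list and joins them once at the end.
import Mathlib
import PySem

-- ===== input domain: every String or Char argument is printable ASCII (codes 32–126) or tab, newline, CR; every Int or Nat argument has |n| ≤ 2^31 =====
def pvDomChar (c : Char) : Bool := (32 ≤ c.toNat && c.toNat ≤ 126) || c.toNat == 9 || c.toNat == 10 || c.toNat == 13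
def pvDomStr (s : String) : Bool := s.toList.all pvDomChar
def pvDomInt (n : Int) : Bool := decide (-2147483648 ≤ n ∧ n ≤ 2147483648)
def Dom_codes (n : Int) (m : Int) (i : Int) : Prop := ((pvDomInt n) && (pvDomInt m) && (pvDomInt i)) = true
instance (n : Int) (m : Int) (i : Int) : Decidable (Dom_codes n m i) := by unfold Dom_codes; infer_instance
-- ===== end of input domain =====

-- B replaces A's self-recursion (string built on the way back up) by a flat for-loop over
-- range(n, m-1) that collects the pieces in a list and joins them once at the end (objective: alternative decomposition).


-- ===== PORT A =====
-- '"{:4d}-{}".format(k, chr(k))': right-justify str(k) in width 4 with spaces, then '-', then the character.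
-- Exact for the codes admitted by Pre_codes (0 ≤ k ≤ 0x10FFFF, not a surrogate), where chr(k) is one Lean Char.
def pyFmt (k : Int) : String :=
  let s := PySem.Int.toStr k
  String.ofList (List.replicate (4 - s.toList.length) ' ') ++ s ++ "-" ++ String.ofList [Char.ofNat k.toNat]

def codes (n : Int) (m : Int) (i : Int) : String :=
  if m - 1 > n then
    let i' := i + 1
    if PySem.Int.mod i' 10 = 0 then
      pyFmt n ++ "\n" ++ codes (n + 1) m i'
    else
      pyFmt n ++ codes (n + 1) m i'
  else
    pyFmt (m - 1)
termination_by (m - n).toNat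
decreasing_by all_goals omega

-- ===== PORT B =====
def codes_alt (n : Int) (m : Int) (i : Int) : String :=
  let step : (List String × Int) → Int → (List String × Int) := fun acc k =>
    let i' := acc.2 + 1
    let ps := acc.1 ++ [pyFmt k]
    let ps := if PySem.Int.mod i' 10 = 0 then ps ++ ["\n"] else ps
    (ps, i')
  let r := (PySem.List.pyRange n (m - 1) 1).foldl step ([], i)
  PySem.Str.join "" (r.1 ++ [pyFmt (m - 1)])

-- ===== PRECONDITION & SPEC =====
-- Pre_ excludes (a) inputs where chr raises ValueError (a code outside 0..0x10FFFF), (b) inputs where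
-- A's recursion exceeds Python's default recursion limit and raises RecursionError (bounded here by
-- m - n ≤ 900), and (c) inputs whose range contains a surrogate code 0xD800..0xDFFF: A returns a string
-- with a lone surrogate there, which is not a value representable as a Lean String (not a valid Char).
def Pre_codes (n : Int) (m : Int) (i : Int) : Prop :=
  if m - 1 > n then
    0 ≤ n ∧ m - 1 ≤ 1114111 ∧ (m - 1 < 55296 ∨ 57344 ≤ n) ∧ m - n ≤ 900
  else
    0 ≤ m - 1 ∧ m - 1 ≤ 1114111 ∧ ¬(55296 ≤ m - 1 ∧ m - 1 ≤ 57343)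
instance (n : Int) (m : Int) (i : Int) : Decidable (Pre_codes n m i) := by unfold Pre_codes; infer_instance

def pvWitness_codes : Int × Int × Int := (65, 70, 0)

def Spec_codes (n : Int) (m : Int) (i : Int) (out : String) : Prop := out = codes_alt n m i
instance (n : Int) (m : Int) (i : Int) (out : String) : Decidable (Spec_codes n m i out) := by unfold Spec_codes; infer_instance

-- ===== CLAIM (what is proved, stated in full; the proofs are below) =====
def Claim_equal_codes : Prop := ∀ (n : Int) (m : Int) (i : Int), Dom_codes n m i → Pre_codes n m i → Spec_codes n m i (codes n m i)

-- ===== LEMMAS AND PROOFS =====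

theorem chars_join_empty (xs : List (List Char)) : PySem.Chars.join [] xs = xs.flatten := by
  induction xs with
  | nil => simp [PySem.Chars.join_nil]
  | cons p rest ih =>
    cases rest with
    | nil => simp [PySem.Chars.join, List.intercalate]
    | cons q r => rw [PySem.Chars.join_cons_cons]; simp_all

theorem join_empty_append (xs ys : List String) :
    PySem.Str.join "" (xs ++ ys) = PySem.Str.join "" xs ++ PySem.Str.join "" ys := by
  simp [PySem.Str.join, chars_join_empty]

theorem join_empty_singleton (s : String) : PySem.Str.join "" [s] = s := by
  simp [PySem.Str.join]

theorem codes_loop (K : Nat) : ∀ (n m i : Int) (ps : List String), (m - 1 - n).toNat = K →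
    PySem.Str.join ""
      ((((PySem.List.pyRange n (m - 1) 1).foldl
          (fun acc k =>
            let i' := acc.2 + 1
            let ps := acc.1 ++ [pyFmt k]
            let ps := if PySem.Int.mod i' 10 = 0 then ps ++ ["\n"] else ps
            (ps, i')) (ps, i)).1) ++ [pyFmt (m - 1)])
      = PySem.Str.join "" ps ++ codes n m i := by
  induction K with
  | zero =>
    intro n m i ps hK
    have h : m - 1 ≤ n := by omega
    rw [PySem.List.pyRange_one_eq_nil h]
    rw [codes]
    rw [if_neg (by omega)]
    simp [join_empty_append, join_empty_singleton]
  | succ K ih =>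
    intro n m i ps hK
    have h : n < m - 1 := by omega
    rw [PySem.List.pyRange_one_cons h]
    rw [codes, if_pos (by omega)]
    simp only [List.foldl_cons]
    by_cases hm : PySem.Int.mod (i + 1) 10 = 0
    · rw [if_pos hm]
      rw [ih (n + 1) m (i + 1) (ps ++ [pyFmt n] ++ ["\n"]) (by omega)]
      simp only [hm, if_pos]
      rw [join_empty_append, join_empty_append, join_empty_singleton, join_empty_singleton]
      simp [String.append_assoc]
    · rw [if_neg hm]
      rw [ih (n + 1) m (i + 1) (ps ++ [pyFmt n]) (by omega)]
      simp only [hm, reduceIte]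
      rw [join_empty_append, join_empty_singleton]
      simp [String.append_assoc]

theorem codes_eq_alt (n m i : Int) : codes n m i = codes_alt n m i := by
  unfold codes_alt
  rw [codes_loop ((m - 1 - n).toNat) n m i [] rfl]
  simp [PySem.Str.join, PySem.Chars.join_nil]

-- ===== VERDICT (by name: the statement is the Claim_ definition above) =====
theorem codes_spec : Claim_equal_codes := by
  intro n m i _ _
  unfold Spec_codes
  exact codes_eq_alt n m i
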